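-- pv_equiv track=rewrite | github.com/PrinceofChum/100-Days-Of-Code | Day 52/Jim and the Skyscrapers using stack.py | fixStack
-- ===== SOURCE A (Python) =====
-- def empty(stk):
--     return len(stk) == 0
--
-- def top(stk):
--     if empty(stk):
--         return None
--     return stk[-1]
--
-- def fixStack(stk, h, debug=False):
--     prev = None
--     count = 0
--     res = 0
--     while not(empty(stk)) and h > top(stk):
--         cur = stk.pop()
--         if prev == None:
--             count = 1
--             prev = cur
--         elif prev != None and cur == prev:
--             count += 1
--             prev = cur
--         elif prev != None and cur != prev:
--             res += max(0, count * (count - 1))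
--             count = 1
--             prev = cur
--     res += max(0, count*(count-1))
--     return stk,res
-- ===== SOURCE B (Python) =====
-- def fixStack(stk, h, debug=False):
--     # Phase 1: locate the cut point, slice off the popped suffix (same in-place mutation as A).
--     i = len(stk)
--     for x in reversed(stk):
--         if x < h:
--             i -= 1
--         else:
--             break
--     popped = stk[i:][::-1]
--     del stk[i:]
--     # Phase 2: run-length scan over the popped values.
--     res = 0
--     j = 0
--     while j < len(popped):
--         k = j + 1
--         while k < len(popped) and popped[k] == popped[j]:
--             k += 1
--         res += (k - j) * (k - j - 1)
--         j = k
--     return stk, res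
-- ===== Notes on version B (the rewrite author's own statement) =====
-- stated objective: alternative
-- what changed: A's single while-loop with an inline prev/count/res state machine is replaced by two phases: first locate the cut point with a reversed scan and slice off the popped suffix at once, then compute the result by a run-length scan (two-pointer) over the popped values, with no prev/count state.
import Mathlib
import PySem

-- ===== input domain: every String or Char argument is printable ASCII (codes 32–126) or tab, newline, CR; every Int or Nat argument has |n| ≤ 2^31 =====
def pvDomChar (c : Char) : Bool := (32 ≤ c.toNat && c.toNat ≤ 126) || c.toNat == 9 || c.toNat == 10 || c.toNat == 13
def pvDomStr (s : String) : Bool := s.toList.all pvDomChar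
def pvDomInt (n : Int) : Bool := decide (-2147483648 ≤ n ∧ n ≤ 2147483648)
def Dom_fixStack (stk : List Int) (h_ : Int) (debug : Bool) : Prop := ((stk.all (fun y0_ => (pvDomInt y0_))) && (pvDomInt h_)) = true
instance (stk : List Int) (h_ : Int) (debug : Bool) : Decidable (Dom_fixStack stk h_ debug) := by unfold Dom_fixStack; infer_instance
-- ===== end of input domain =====

-- B replaces A's single loop with its inline prev/count state machine by a two-phase pass (find the
-- cut point, then a run-length scan of the popped suffix); in Python both mutate stk identically and
-- the equivalence proved here is about the return value.

-- ===== PORT A =====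
-- A's while loop on the reversed stack (head = Python's stk[-1]); state (prev, count, res) as in A.
def fixStackLoop (h : Int) : List Int → Option Int → Int → Int → List Int × Int
  | [], _, count, res => ([], res + max 0 (count * (count - 1)))
  | c :: rest, prev, count, res =>
    if h > c then
      match prev with
      | none => fixStackLoop h rest (some c) 1 res
      | some p =>
        if c = p then fixStackLoop h rest (some p) (count + 1) res
        else fixStackLoop h rest (some c) 1 (res + max 0 (count * (count - 1)))
    else (c :: rest, res + max 0 (count * (count - 1)))

def fixStack (stk : List Int) (h_ : Int) (debug : Bool) : List Int × Int :=
  let r := fixStackLoop h_ stk.reverse none 0 0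
  (r.1.reverse, r.2)

-- ===== PORT B =====
-- B's run-length scan over popped (outer while; the inner while k-scan is the takeWhile).
-- fuel (= initial length) only makes the recursion structural; the computation is B's j/k scan
def bRunsGo : Nat → List Int → Int
  | _, [] => 0
  | 0, _ :: _ => 0
  | fuel + 1, x :: rest =>
      let k := (rest.takeWhile (fun y => y == x)).length
      ((k : Int) + 1) * (k : Int) + bRunsGo fuel (rest.drop k)

def bRuns (l : List Int) : Int := bRunsGo l.length l

-- B: i = len(stk) minus how many trailing elements satisfy x < h (the reversed-for loop with break);
-- popped = stk[i:][::-1]; return (stk[:i], run-length sum over popped).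
def fixStack_alt (stk : List Int) (h_ : Int) (debug : Bool) : List Int × Int :=
  let i := stk.length - (stk.reverse.takeWhile (fun x => decide (x < h_))).length
  let popped := (stk.drop i).reverse
  (stk.take i, bRuns popped)

-- ===== PRECONDITION & SPEC =====
def Spec_fixStack (stk : List Int) (h_ : Int) (debug : Bool) (out : List Int × Int) : Prop := out = fixStack_alt stk h_ debug
instance (stk : List Int) (h_ : Int) (debug : Bool) (out : List Int × Int) : Decidable (Spec_fixStack stk h_ debug out) := by unfold Spec_fixStack; infer_instance

-- ===== CLAIM (what is proved, stated in full; the proofs are below) =====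
def Claim_equal_fixStack : Prop := ∀ (stk : List Int) (h_ : Int) (debug : Bool), Dom_fixStack stk h_ debug → Spec_fixStack stk h_ debug (fixStack stk h_ debug)

-- ===== LEMMAS AND PROOFS =====

lemma bRunsGo_congr : ∀ (f1 f2 : Nat) (l : List Int), l.length ≤ f1 → l.length ≤ f2 →
    bRunsGo f1 l = bRunsGo f2 l := by
  intro f1
  induction f1 with
  | zero =>
    intro f2 l h1 h2
    match l, h1 with
    | [], _ => cases f2 <;> rfl
  | succ f1 ih =>
    intro f2 l h1 h2
    match l with
    | [] => cases f2 <;> rfl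
    | x :: rest =>
      match f2 with
      | 0 => simp at h2
      | g + 1 =>
        simp only [bRunsGo]
        rw [ih g (rest.drop (rest.takeWhile (fun y => y == x)).length)
            (by simp at h1 ⊢; omega) (by simp at h2 ⊢; omega)]

lemma bRuns_nil : bRuns [] = 0 := rfl

lemma bRuns_cons (x : Int) (rest : List Int) :
    bRuns (x :: rest) =
      (((rest.takeWhile (fun y => y == x)).length : Int) + 1) *
          ((rest.takeWhile (fun y => y == x)).length : Int) +
        bRuns (rest.drop (rest.takeWhile (fun y => y == x)).length) := by
  show bRunsGo (rest.length + 1) (x :: rest) = _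
  simp only [bRunsGo]
  rw [bRunsGo_congr rest.length (rest.drop (rest.takeWhile (fun y => y == x)).length).length
      (rest.drop (rest.takeWhile (fun y => y == x)).length) (by simp) (by simp)]
  rfl

-- the continuation of A's loop, restricted to the sequence of popped values
def runsCont : Option Int → Int → List Int → Int
  | _, count, [] => max 0 (count * (count - 1))
  | none, _, c :: rest => runsCont (some c) 1 rest
  | some p, count, c :: rest =>
      if c = p then runsCont (some p) (count + 1) rest
      else max 0 (count * (count - 1)) + runsCont (some c) 1 rest

lemma loopA_eq (h : Int) (l : List Int) : ∀ (prev : Option Int) (count res : Int),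
    fixStackLoop h l prev count res =
      (l.dropWhile (fun c => decide (c < h)),
       res + runsCont prev count (l.takeWhile (fun c => decide (c < h)))) := by
  induction l with
  | nil => intro prev count res; simp [fixStackLoop, runsCont]
  | cons c rest ih =>
    intro prev count res
    by_cases hc : c < h
    · have hc' : (decide (c < h)) = true := by simpa using hc
      cases prev with
      | none => simp [fixStackLoop, hc, hc', runsCont, ih]
      | some p =>
        by_cases hp : c = p
        · subst hp
          simp [fixStackLoop, hc, hc', runsCont, ih]
        · simp [fixStackLoop, hc, hc', hp, runsCont, ih, Int.add_assoc]
    · have hc' : (decide (c < h)) = false := by simpa using hc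
      simp [fixStackLoop, hc, hc', runsCont]

lemma runsCont_some (l : List Int) : ∀ (x c : Int), 1 ≤ c →
    runsCont (some x) c l =
      (c + ((l.takeWhile (fun y => y == x)).length : Int)) *
          (c + ((l.takeWhile (fun y => y == x)).length : Int) - 1) +
        bRuns (l.drop (l.takeWhile (fun y => y == x)).length) := by
  induction l with
  | nil =>
    intro x c hc
    have h0 : (0 : Int) ≤ c * (c - 1) := Int.mul_nonneg (by omega) (by omega)
    simp [runsCont, bRuns_nil, max_eq_right h0]
  | cons y rest ih =>
    intro x c hc
    by_cases hy : y = x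
    · subst hy
      have h1 := ih y (c + 1) (by omega)
      simp [runsCont, List.takeWhile_cons, h1]
      push_cast
      ring_nf
    · have hy' : (y == x) = false := by simpa using hy
      have h1 := ih y 1 (by omega)
      have hmax : max 0 (c * (c - 1)) = c * (c - 1) :=
        max_eq_right (Int.mul_nonneg (by omega) (by omega))
      simp [runsCont, hy, hy', hmax, h1, bRuns_cons]
      exact Or.inl (by ring)

lemma runsCont_none (l : List Int) : runsCont none 0 l = bRuns l := by
  cases l with
  | nil => simp [runsCont, bRuns_nil]
  | cons x rest =>
    have h1 := runsCont_some rest x 1 (by omega)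
    simp [runsCont, h1, bRuns_cons]
    exact Or.inl (by ring)

lemma split_take_drop (l : List Int) (q : Int → Bool) :
    l.take (l.length - (l.reverse.takeWhile q).length) = (l.reverse.dropWhile q).reverse ∧
    l.drop (l.length - (l.reverse.takeWhile q).length) = (l.reverse.takeWhile q).reverse := by
  obtain ⟨t, d, ht, hd⟩ : ∃ t d, t = l.reverse.takeWhile q ∧ d = l.reverse.dropWhile q :=
    ⟨_, _, rfl, rfl⟩
  rw [← ht, ← hd]
  have hrev : l = d.reverse ++ t.reverse := by
    rw [ht, hd, ← List.reverse_append, List.takeWhile_append_dropWhile, List.reverse_reverse]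
  have h2 : l.length = d.length + t.length := by
    rw [show l.length = (d.reverse ++ t.reverse).length from congrArg List.length hrev]
    simp
  have hlen : l.length - t.length = d.length := by omega
  refine ⟨?_, ?_⟩
  · rw [hlen, hrev]
    simpa using List.take_left d.reverse t.reverse
  · rw [hlen, hrev]
    simpa using List.drop_left d.reverse t.reverse

-- ===== VERDICT (by name: the statement is the Claim_ definition above) =====
theorem fixStack_spec : Claim_equal_fixStack := by
  intro stk h_ debug _
  unfold Spec_fixStack fixStack fixStack_alt
  dsimp only
  obtain ⟨h1, h2⟩ := split_take_drop stk (fun c : Int => decide (c < h_))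
  rw [loopA_eq, runsCont_none, h1, h2]
  simp
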